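-- pv_equiv track=rewrite | github.com/pypi-data/pypi-mirror-397 | packages/pipemake-utils/pipemake_utils-1.3.5.tar.gz/pipemake_utils-1.3.5/pipemake_utils/mk.py | outToCodons
-- ===== SOURCE A (Python) =====
-- from itertools import product
--
-- def outToCodons(iupac_codon):
--     # Define the IUPAC-to-nucleotide mapping
--     iupac_dict = {
--         "A": ["A"],
--         "C": ["C"],
--         "G": ["G"],
--         "T": ["T"],
--         "R": ["A", "G"],
--         "Y": ["C", "T"],
--         "S": ["G", "C"],
--         "W": ["A", "T"],
--         "K": ["G", "T"],
--         "M": ["A", "C"],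
--     }
--
--     # Create a list of nucleotides for each IUPAC code
--     nucleotide_list = [iupac_dict[nucl] for nucl in iupac_codon]
--
--     # Return the product of the nucleotide lists
--     return ["".join(codon_list) for codon_list in product(*nucleotide_list)]
-- ===== SOURCE B (Python) =====
-- def outToCodons(iupac_codon):
--     # IUPAC code -> its nucleotide options, as a string
--     iupac = {"A": "A", "C": "C", "G": "G", "T": "T", "R": "AG",
--              "Y": "CT", "S": "GC", "W": "AT", "K": "GT", "M": "AC"}
--     options = [iupac[nucl] for nucl in iupac_codon]
--     # Count the combinations, then decode each index 0..total-1 in the mixed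
--     # radix given by the option counts (last position = least significant
--     # digit), which reproduces itertools.product's order (last varies fastest).
--     total = 1
--     for opts in options:
--         total *= len(opts)
--     codons = []
--     for i in range(total):
--         chars = []
--         rem = i
--         for opts in reversed(options):
--             rem, digit = divmod(rem, len(opts))
--             chars.append(opts[digit])
--         codons.append("".join(reversed(chars)))
--     return codons
-- ===== Notes on version B (the rewrite author's own statement) =====
-- stated objective: alternative
-- what changed: Replaces itertools.product enumeration with counting the combinations and mixed-radix decoding of each index 0..total-1 (divmod by each position's option count, last position least significant) into a codon.
import Mathlib
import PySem

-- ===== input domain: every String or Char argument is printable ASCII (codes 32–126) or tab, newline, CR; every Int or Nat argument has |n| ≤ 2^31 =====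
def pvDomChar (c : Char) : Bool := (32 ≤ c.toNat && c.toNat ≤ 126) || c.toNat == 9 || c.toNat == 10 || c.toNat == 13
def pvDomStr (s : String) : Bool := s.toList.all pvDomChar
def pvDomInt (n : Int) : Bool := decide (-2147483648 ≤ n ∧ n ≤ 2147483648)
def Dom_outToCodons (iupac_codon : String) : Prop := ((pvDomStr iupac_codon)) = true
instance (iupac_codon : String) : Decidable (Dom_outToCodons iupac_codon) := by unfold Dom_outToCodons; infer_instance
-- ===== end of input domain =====

-- B replaces the itertools.product enumeration with mixed-radix index decoding: it counts
-- the combinations and decodes each index 0..total-1 into a codon (objective: alternative).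

-- A's IUPAC-to-nucleotide dict ([] marks a key that raises KeyError, excluded by Pre_)
def pvIupac (c : Char) : List Char :=
  if c = 'A' then ['A']
  else if c = 'C' then ['C']
  else if c = 'G' then ['G']
  else if c = 'T' then ['T']
  else if c = 'R' then ['A', 'G']
  else if c = 'Y' then ['C', 'T']
  else if c = 'S' then ['G', 'C']
  else if c = 'W' then ['A', 'T']
  else if c = 'K' then ['G', 'T']
  else if c = 'M' then ['A', 'C']
  else []

-- ===== PORT A =====
-- itertools.product(*lists): foldr, last list varies fastest (exact for product's order)
def pvProduct (ls : List (List Char)) : List (List Char) :=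
  ls.foldr (fun xs acc => xs.flatMap (fun x => acc.map (fun cs => x :: cs))) [[]]

def outToCodons (iupac_codon : String) : List String :=
  let nucleotide_list := iupac_codon.toList.map pvIupac
  (pvProduct nucleotide_list).map (fun codon_list => String.ofList codon_list)

-- B's IUPAC mapping: option STRINGS ("" marks a key that raises KeyError, excluded by Pre_)
def pvIupacStr (c : Char) : String :=
  if c = 'A' then "A"
  else if c = 'C' then "C"
  else if c = 'G' then "G"
  else if c = 'T' then "T"
  else if c = 'R' then "AG"
  else if c = 'Y' then "CT"
  else if c = 'S' then "GC"
  else if c = 'W' then "AT"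
  else if c = 'K' then "GT"
  else if c = 'M' then "AC"
  else ""

-- ===== PORT B =====
-- Mixed-radix decoding of each index i in range(total); divmod's divisor is each option
-- list's length, positive on Pre_ (on Pre_ the pyGet? index is in range, so getD's
-- default is never consulted; outside Pre_ total = 0 and the range loop body never runs).
def outToCodons_alt (iupac_codon : String) : List String :=
  let options := iupac_codon.toList.map (fun nucl => (pvIupacStr nucl).toList)
  let total := options.foldl (fun t opts => t * (opts.length : Int)) 1
  (PySem.List.pyRange 0 total 1).map (fun i =>
    let st := options.reverse.foldl
      (fun (st : Int × List Char) opts =>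
        (PySem.Int.floordiv st.1 (opts.length : Int),
         st.2 ++ [(PySem.List.pyGet? opts (PySem.Int.mod st.1 (opts.length : Int))).getD 'A']))
      (i, ([] : List Char))
    String.ofList st.2.reverse)

-- ===== PRECONDITION & SPEC =====
-- Pre_ excludes exactly the strings containing a character outside the IUPAC dict, on which Python A raises KeyError.
def Pre_outToCodons (iupac_codon : String) : Prop :=
  (iupac_codon.toList.all (fun c => c ∈ (['A','C','G','T','R','Y','S','W','K','M'] : List Char))) = true
instance (iupac_codon : String) : Decidable (Pre_outToCodons iupac_codon) := by unfold Pre_outToCodons; infer_instance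
def pvWitness_outToCodons : String := "RYS"

def Spec_outToCodons (iupac_codon : String) (out : List String) : Prop := out = outToCodons_alt iupac_codon
instance (iupac_codon : String) (out : List String) : Decidable (Spec_outToCodons iupac_codon out) := by unfold Spec_outToCodons; infer_instance

-- ===== CLAIM (what is proved, stated in full; the proofs are below) =====
def Claim_equal_outToCodons : Prop := ∀ (iupac_codon : String), Dom_outToCodons iupac_codon → Pre_outToCodons iupac_codon → Spec_outToCodons iupac_codon (outToCodons iupac_codon)

-- ===== LEMMAS AND PROOFS =====

-- proof-side name for B's per-index decoding loop, as a foldr over the (unreversed) positions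
def pvDecode : List (List Char) → Int → Int × List Char
  | [], i => (i, [])
  | o :: rest, i =>
      let st := pvDecode rest i
      (PySem.Int.floordiv st.1 (o.length : Int),
       st.2 ++ [(PySem.List.pyGet? o (PySem.Int.mod st.1 (o.length : Int))).getD 'A'])
def pvN (ls : List (List Char)) : Nat := (ls.map List.length).prod


lemma pv_foldl_reverse_eq_decode (ls : List (List Char)) (i : Int) :
    ls.reverse.foldl
      (fun (st : Int × List Char) opts =>
        (PySem.Int.floordiv st.1 (opts.length : Int),
         st.2 ++ [(PySem.List.pyGet? opts (PySem.Int.mod st.1 (opts.length : Int))).getD 'A']))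
      (i, ([] : List Char))
    = pvDecode ls i := by
  rw [List.foldl_reverse]
  induction ls with
  | nil => rfl
  | cons o rest ih => simp [pvDecode, ih]

lemma pv_foldl_mul (ls : List (List Char)) (a : Int) :
    ls.foldl (fun t opts => t * (opts.length : Int)) a = a * (pvN ls : Int) := by
  induction ls generalizing a with
  | nil => simp [pvN]
  | cons o rest ih => simp [pvN, ih, List.prod_cons]; ring

lemma pv_decode_shift (ls : List (List Char)) (h : ∀ o ∈ ls, o ≠ []) :
    ∀ (j r : Int), 0 ≤ j → 0 ≤ r → r < (pvN ls : Int) →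
    pvDecode ls (j * (pvN ls : Int) + r) = (j, (pvDecode ls r).2) := by
  induction ls with
  | nil =>
      intro j r hj hr hlt
      simp [pvN] at hlt ⊢
      have : r = 0 := by omega
      simp [pvDecode, this]
  | cons o rest ih =>
      intro j r hj hr hlt
      have ho : o ≠ [] := h o (by simp)
      have hlen : 0 < (o.length : Int) := by
        have := List.length_pos_iff.mpr ho; exact_mod_cast this
      have hM : 0 < (pvN rest : Int) := by
        have : ∀ o' ∈ rest, o' ≠ [] := fun o' m => h o' (by simp [m])
        have : 0 < pvN rest := by
          unfold pvN
          apply List.prod_pos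
          intro x hx
          simp at hx
          obtain ⟨a, ha, rfl⟩ := hx
          exact List.length_pos_iff.mpr (this a ha)
        exact_mod_cast this
      set M : Int := (pvN rest : Int) with hMdef
      have hNcons : ((pvN (o :: rest) : Nat) : Int) = (o.length : Int) * M := by
        simp [pvN, hMdef]
      set d : Int := r / M with hd
      set r' : Int := r % M with hr'
      have hdnn : 0 ≤ d := Int.ediv_nonneg hr (le_of_lt hM)
      have hr'nn : 0 ≤ r' := Int.emod_nonneg r (ne_of_gt hM)
      have hr'lt : r' < M := Int.emod_lt_of_pos r hM
      have hdlt : d < (o.length : Int) := by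
        rw [hd, Int.ediv_lt_iff_lt_mul hM]
        rw [hNcons] at hlt
        exact hlt
      have hrsplit : r = d * M + r' := by
        rw [hd, hr']
        have := Int.mul_ediv_add_emod r M
        linarith
      have key1 : j * ((pvN (o :: rest) : Nat) : Int) + r = (j * o.length + d) * M + r' := by
        rw [hNcons, hrsplit]; ring
      have hrec1 := ih (fun o' m => h o' (by simp [m])) (j * o.length + d) r'
        (by positivity) hr'nn hr'lt
      have hrec2 := ih (fun o' m => h o' (by simp [m])) d r' hdnn hr'nn hr'lt
      have heq : j * (o.length : Int) + d = d + (o.length : Int) * j := by ring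
      have hq1 : PySem.Int.floordiv (j * o.length + d) (o.length : Int) = j := by
        rw [PySem.Int.floordiv_eq_ediv_of_pos hlen, heq,
          Int.add_mul_ediv_left _ _ (ne_of_gt hlen),
          Int.ediv_eq_zero_of_lt hdnn hdlt, zero_add]
      have hm1 : PySem.Int.mod (j * o.length + d) (o.length : Int) = d := by
        rw [PySem.Int.mod_eq_emod_of_pos hlen, heq, Int.add_mul_emod_self_left,
          Int.emod_eq_of_lt hdnn hdlt]
      have hq2 : PySem.Int.floordiv d (o.length : Int) = 0 := by
        rw [PySem.Int.floordiv_eq_ediv_of_pos hlen]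
        exact Int.ediv_eq_zero_of_lt hdnn hdlt
      have hm2 : PySem.Int.mod d (o.length : Int) = d := by
        rw [PySem.Int.mod_eq_emod_of_pos hlen]
        exact Int.emod_eq_of_lt hdnn hdlt
      have hA : pvDecode (o :: rest) (j * ((pvN (o :: rest) : Nat) : Int) + r)
          = (j, (pvDecode rest r').2 ++ [(PySem.List.pyGet? o d).getD 'A']) := by
        simp only [pvDecode, key1, hrec1]
        simp [hq1, hm1]
      have hB : pvDecode (o :: rest) r
          = (0, (pvDecode rest r').2 ++ [(PySem.List.pyGet? o d).getD 'A']) := by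
        simp only [pvDecode]
        rw [hrsplit, hrec2]
        simp [hq2, hm2]
      rw [hA, hB]

lemma pvN_pos (ls : List (List Char)) (h : ∀ o ∈ ls, o ≠ []) : 0 < pvN ls := by
  unfold pvN
  apply List.prod_pos
  intro x hx
  simp at hx
  obtain ⟨a, ha, rfl⟩ := hx
  exact List.length_pos_iff.mpr (h a ha)

lemma pv_block (o : List Char) (rest : List (List Char))
    (h : ∀ o' ∈ o :: rest, o' ≠ [])
    (ihrest : (PySem.List.pyRange 0 (pvN rest : Int) 1).map (fun i => (pvDecode rest i).2.reverse)
      = pvProduct rest) :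
    ∀ k, k ≤ o.length →
      (PySem.List.pyRange 0 ((k * pvN rest : Nat) : Int) 1).map
          (fun i => (pvDecode (o :: rest) i).2.reverse)
        = (o.take k).flatMap (fun x => (pvProduct rest).map (fun cs => x :: cs)) := by
  have hrest : ∀ o' ∈ rest, o' ≠ [] := fun o' m => h o' (by simp [m])
  have hM : 0 < (pvN rest : Int) := by exact_mod_cast pvN_pos rest hrest
  have hlen : 0 < (o.length : Int) := by
    exact_mod_cast List.length_pos_iff.mpr (h o (by simp))
  intro k
  induction k with
  | zero => simp
  | succ k ihk =>
      intro hk1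
      have hk : k ≤ o.length := Nat.le_of_succ_le hk1
      have hkl : k < o.length := hk1
      have hsplit : PySem.List.pyRange 0 (((k + 1) * pvN rest : Nat) : Int) 1
          = PySem.List.pyRange 0 ((k * pvN rest : Nat) : Int) 1
            ++ PySem.List.pyRange ((k * pvN rest : Nat) : Int) (((k + 1) * pvN rest : Nat) : Int) 1 := by
        apply PySem.List.pyRange_one_append
        · positivity
        · push_cast; nlinarith
      have hblock : PySem.List.pyRange ((k * pvN rest : Nat) : Int) (((k + 1) * pvN rest : Nat) : Int) 1
          = (PySem.List.pyRange 0 (pvN rest : Int) 1).map (fun r => ((k * pvN rest : Nat) : Int) + r) := by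
        rw [PySem.List.pyRange_one, PySem.List.pyRange_one]
        have h1 : ((((k + 1) * pvN rest : Nat) : Int) - ((k * pvN rest : Nat) : Int)) = (pvN rest : Int) := by
          push_cast; ring
        rw [h1]
        simp
      have hdec : ∀ r ∈ PySem.List.pyRange 0 (pvN rest : Int) 1,
          (pvDecode (o :: rest) (((k * pvN rest : Nat) : Int) + r)).2.reverse
            = o[k]'hkl :: (pvDecode rest r).2.reverse := by
        intro r hrmem
        rw [PySem.List.mem_pyRange_one] at hrmem
        have hx : ((k * pvN rest : Nat) : Int) + r = (k : Int) * (pvN rest : Int) + r := by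
          push_cast; ring
        have hshift := pv_decode_shift rest hrest (k : Int) r (by positivity) hrmem.1 hrmem.2
        simp only [pvDecode, hx, hshift]
        have hmk : PySem.Int.mod (k : Int) (o.length : Int) = (k : Int) := by
          rw [PySem.Int.mod_eq_emod_of_pos hlen]
          exact Int.emod_eq_of_lt (by positivity) (by exact_mod_cast hkl)
        have hget : (PySem.List.pyGet? o (k : Int)).getD 'A' = o[k]'hkl := by
          simp [PySem.List.pyGet?_natCast, List.getElem?_eq_getElem hkl]
        simp [hmk, List.getElem?_eq_getElem hkl]
      have htake : o.take (k + 1) = o.take k ++ [o[k]'hkl] := by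
        rw [List.take_add_one, List.getElem?_eq_getElem hkl]
        rfl
      rw [hsplit, List.map_append, ihk hk, hblock, List.map_map, htake, List.flatMap_append]
      congr 1
      have := List.map_congr_left hdec
      calc (PySem.List.pyRange 0 (pvN rest : Int) 1).map
            ((fun i => (pvDecode (o :: rest) i).2.reverse) ∘ fun r => ((k * pvN rest : Nat) : Int) + r)
          = (PySem.List.pyRange 0 (pvN rest : Int) 1).map
            (fun r => o[k]'hkl :: (pvDecode rest r).2.reverse) := List.map_congr_left hdec
        _ = ((PySem.List.pyRange 0 (pvN rest : Int) 1).map (fun i => (pvDecode rest i).2.reverse)).map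
            (fun cs => o[k]'hkl :: cs) := by rw [List.map_map]; simp [Function.comp_def]
        _ = (pvProduct rest).map (fun cs => o[k]'hkl :: cs) := by rw [ihrest]
      simp


lemma pv_range_decode (ls : List (List Char)) (h : ∀ o ∈ ls, o ≠ []) :
    (PySem.List.pyRange 0 (pvN ls : Int) 1).map (fun i => (pvDecode ls i).2.reverse)
    = pvProduct ls := by
  induction ls with
  | nil =>
      have : pvN ([] : List (List Char)) = 1 := by simp [pvN]
      rw [this]
      simp [PySem.List.pyRange_one, pvProduct, pvDecode]
  | cons o rest ih =>
      have hN : pvN (o :: rest) = o.length * pvN rest := by simp [pvN]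
      rw [hN]
      have := pv_block o rest h (ih fun o' m => h o' (by simp [m])) o.length le_rfl
      rw [this, List.take_length]
      simp [pvProduct]

-- B's string mapping lists the same options as A's dict
lemma pvIupacStr_toList (c : Char) : (pvIupacStr c).toList = pvIupac c := by
  unfold pvIupacStr pvIupac
  split_ifs <;> rfl

-- each character admitted by Pre_ maps to a nonempty option list
lemma pvIupac_ne_nil (c : Char)
    (h : c ∈ (['A','C','G','T','R','Y','S','W','K','M'] : List Char)) : pvIupac c ≠ [] := by
  simp only [List.mem_cons, List.not_mem_nil, or_false] at h
  rcases h with rfl | rfl | rfl | rfl | rfl | rfl | rfl | rfl | rfl | rfl <;> decide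

-- ===== VERDICT (by name: the statement is the Claim_ definition above) =====
theorem outToCodons_spec : Claim_equal_outToCodons := by
  intro s _ hpre
  unfold Pre_outToCodons at hpre
  rw [List.all_eq_true] at hpre
  have hne : ∀ o ∈ s.toList.map pvIupac, o ≠ [] := by
    intro o m
    simp only [List.mem_map] at m
    obtain ⟨c, hc, rfl⟩ := m
    exact pvIupac_ne_nil c (by simpa using hpre c hc)
  unfold Spec_outToCodons outToCodons outToCodons_alt
  dsimp only
  simp only [pvIupacStr_toList]
  rw [pv_foldl_mul _ 1, one_mul]
  simp only [pv_foldl_reverse_eq_decode]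
  rw [← pv_range_decode _ hne, List.map_map]
  simp [Function.comp_def]
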